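-- pv_equiv track=rewrite | github.com/RTimothyEdwards/open_pdks | common/cdl2spi.py | mapSubcktDef
-- ===== SOURCE A (Python) =====
-- def mapSubcktDef(tok):
--     # find index of one-past first token (beyond ".subckt NM") containing an =, if any
--     param0 = len(tok)
--     for i in range(2, len(tok)):
--         if '=' in tok[i]:
--             param0 = i+1
--             break
--     # find first token before or including that 1st-param, starting with /:
--     #   strip the slash.
--     for i in range(2, param0):
--         if tok[i][0] == '/':
--             tok[i] = tok[i][1:]
--             if tok[i] == "":
--                 del tok[i]
--             break
--     return tok
-- ===== SOURCE B (Python) =====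
-- def mapSubcktDef(tok):
--     # One pass instead of A's two: the slash may only be stripped at or before
--     # the first '='-containing token, so stop at the first token that starts
--     # with '/' (strip it) or, failing that, contains '=' (done).
--     for i in range(2, len(tok)):
--         t = tok[i]
--         if t.startswith('/'):
--             tok[i] = t[1:]
--             if tok[i] == "":
--                 del tok[i]
--             break
--         elif '=' in t:
--             break
--     return tok
-- ===== Notes on version B (the rewrite author's own statement) =====
-- stated objective: simpler
-- what changed: A's two sequential index loops (first compute param0 = one past the first '='-token, then rescan from 2 for a leading slash) are fused into a single pass with no param0 that stops at the first token starting with '/' (strips it) or containing '=' (stops), using startswith instead of an indexing that can raise.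
import Mathlib
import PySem

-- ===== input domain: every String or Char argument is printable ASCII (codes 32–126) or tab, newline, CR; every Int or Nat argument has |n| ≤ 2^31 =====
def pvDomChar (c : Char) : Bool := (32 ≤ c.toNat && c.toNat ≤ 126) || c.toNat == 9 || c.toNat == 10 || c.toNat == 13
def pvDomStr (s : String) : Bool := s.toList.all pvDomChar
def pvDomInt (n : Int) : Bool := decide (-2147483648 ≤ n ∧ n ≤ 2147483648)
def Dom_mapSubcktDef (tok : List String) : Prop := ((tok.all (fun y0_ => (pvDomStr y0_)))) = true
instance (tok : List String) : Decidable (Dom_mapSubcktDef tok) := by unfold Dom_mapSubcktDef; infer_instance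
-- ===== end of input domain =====

-- B fuses A's two index loops into a single pass with no param0 and a non-raising
-- startswith test (objective: simpler).  Both Pythons mutate tok in place; the
-- equivalence proved here is about the return value only (B performs the same mutation).

-- ===== PORT A =====
-- first loop: param0 = i+1 for the first i in range(2, len(tok)) with '=' in tok[i], else
-- len(tok); fuel (called with tok.length ≥ the iteration count) only makes the index
-- recursion structural.  '=' in tok[i] for the single character '=' is char membership.
def mapALoop1 (tok : List String) : Nat → Nat → Nat
  | 0, _ => tok.length
  | fuel + 1, i =>
    if h : i < tok.length then
      if '=' ∈ (tok[i]).toList then i + 1 else mapALoop1 tok fuel (i + 1)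
    else tok.length

-- second loop over range(2, param0): tok[i][0] raises IndexError on an empty token
-- (the [] branch; those inputs are excluded by Pre_); tok[i] = tok[i][1:] is set,
-- del tok[i] is eraseIdx; t[1:] = drop 1 exactly (Python slices clamp)
def mapALoop2 (tok : List String) : Nat → Nat → Nat → List String
  | 0, _, _ => tok
  | fuel + 1, param0, i =>
    if i < param0 then
      match (tok.getD i "").toList with
      | [] => tok      -- Python raises IndexError here; outside Pre_
      | c :: rest =>
        if c = '/' then
          let s' := String.ofList rest
          if s' = "" then tok.eraseIdx i else tok.set i s'
        else mapALoop2 tok fuel param0 (i + 1)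
    else tok

def mapSubcktDef (tok : List String) : List String :=
  mapALoop2 tok tok.length (mapALoop1 tok tok.length 2) 2

-- ===== PORT B =====
-- single loop over range(2, len(tok)); t.startswith('/') is PySem.Str.startswith
def mapBLoop (tok : List String) : Nat → Nat → List String
  | 0, _ => tok
  | fuel + 1, i =>
    if h : i < tok.length then
      let t := tok[i]
      if PySem.Str.startswith t "/" then
        let s' := String.ofList (t.toList.drop 1)   -- t[1:]
        if s' = "" then tok.eraseIdx i else tok.set i s'
      else if '=' ∈ t.toList then tok
      else mapBLoop tok fuel (i + 1)
    else tok

def mapSubcktDef_alt (tok : List String) : List String :=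
  mapBLoop tok tok.length 2

-- ===== PRECONDITION & SPEC =====
-- Pre_ excludes exactly the inputs on which A raises IndexError: those where some
-- empty token at index ≥ 2 is preceded (from index 2 on) only by tokens that neither
-- start with '/' nor contain '='.
def Pre_mapSubcktDef (tok : List String) : Prop :=
  ¬ ∃ k < tok.length, 2 ≤ k ∧ tok.getD k "" = "" ∧
      ∀ j < k, 2 ≤ j →
        ((tok.getD j "").toList.take 1 ≠ ['/'] ∧ '=' ∉ (tok.getD j "").toList)
instance (tok : List String) : Decidable (Pre_mapSubcktDef tok) := by
  unfold Pre_mapSubcktDef; infer_instance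

def pvWitness_mapSubcktDef : List String := [".subckt", "NM", "/net1", "w=1"]

def Spec_mapSubcktDef (tok : List String) (out : List String) : Prop := out = mapSubcktDef_alt tok
instance (tok : List String) (out : List String) : Decidable (Spec_mapSubcktDef tok out) := by unfold Spec_mapSubcktDef; infer_instance

-- ===== CLAIM (what is proved, stated in full; the proofs are below) =====
def Claim_equal_mapSubcktDef : Prop := ∀ (tok : List String), Dom_mapSubcktDef tok → Pre_mapSubcktDef tok → Spec_mapSubcktDef tok (mapSubcktDef tok)

-- ===== LEMMAS AND PROOFS =====

-- "A's scan starting at index i reaches no empty token before a stopping token"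
def NoRaiseFrom (tok : List String) (i : Nat) : Prop :=
  ¬ ∃ k < tok.length, i ≤ k ∧ tok.getD k "" = "" ∧
      ∀ j < k, i ≤ j →
        ((tok.getD j "").toList.take 1 ≠ ['/'] ∧ '=' ∉ (tok.getD j "").toList)

theorem noRaiseFrom_step (tok : List String) (i : Nat)
    (h : NoRaiseFrom tok i)
    (hc : (tok.getD i "").toList.take 1 ≠ ['/'] ∧ '=' ∉ (tok.getD i "").toList) :
    NoRaiseFrom tok (i + 1) := by
  rintro ⟨k, hk, hik, he, hall⟩
  exact h ⟨k, hk, by omega, he, fun j hj hij => by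
    rcases Nat.eq_or_lt_of_le hij with rfl | hlt
    · exact hc
    · exact hall j hj (by omega)⟩

theorem noRaiseFrom_ne_empty (tok : List String) (i : Nat)
    (h : NoRaiseFrom tok i) (hi : i < tok.length) :
    tok.getD i "" ≠ "" := by
  intro he
  exact h ⟨i, hi, le_refl i, he, fun j hj hij => by omega⟩

theorem mapALoop1_ge (tok : List String) (fuel i : Nat) (hi : i ≤ tok.length) :
    i ≤ mapALoop1 tok fuel i := by
  induction fuel generalizing i with
  | zero => exact hi
  | succ fuel ih =>
    simp only [mapALoop1]
    split
    · split
      · omega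
      · have := ih (i + 1) (by omega)
        omega
    · exact hi

theorem mapALoop2_stop (tok : List String) (fuel param0 i : Nat) (h : ¬ i < param0) :
    mapALoop2 tok fuel param0 i = tok := by
  cases fuel with
  | zero => rfl
  | succ fuel => simp [mapALoop2, h]

theorem startswith_slash (t : String) :
    PySem.Str.startswith t "/" = true ↔ t.toList.take 1 = ['/'] := by
  rw [show (PySem.Str.startswith t "/") = PySem.Chars.startswith t.toList "/".toList from by
        simp [PySem.Str.startswith],
      PySem.Chars.startswith_iff]
  constructor
  · rintro ⟨l, hl⟩
    rw [← hl]; rfl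
  · intro h
    cases ht : t.toList with
    | nil => rw [ht] at h; simp at h
    | cons c rest =>
      rw [ht] at h
      simp only [List.take_succ_cons, List.take_zero] at h
      injection h with h1
      exact ⟨rest, by simp [show "/".toList = ['/'] from rfl, h1]⟩

-- main loop invariant: starting at any index i with enough fuel and no raise
-- ahead, A's two loops compute what B's single loop computes
theorem main_loop (tok : List String) (fuel : Nat) :
    ∀ i, tok.length ≤ i + fuel → NoRaiseFrom tok i →
      mapALoop2 tok fuel (mapALoop1 tok fuel i) i = mapBLoop tok fuel i := by
  induction fuel with
  | zero => intro i _ _; rfl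
  | succ fuel ih =>
    intro i hfuel h
    by_cases hi : i < tok.length
    · have hget : tok.getD i "" = tok[i] := by
        simp [List.getD, List.getElem?_eq_getElem hi]
      cases hl : (tok[i]).toList with
      | nil =>
        exact absurd (by rw [hget]; exact String.toList_inj.mp (by simp [hl]))
          (noRaiseFrom_ne_empty tok i h hi)
      | cons c rest =>
        by_cases hc : c = '/'
        · -- token starts with '/': both strip it and stop
          subst hc
          have hp : i < mapALoop1 tok (fuel + 1) i := by
            simp only [mapALoop1]
            rw [dif_pos hi]
            split
            · omega
            · have := mapALoop1_ge tok fuel (i + 1) (by omega)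
              omega
          have htake : (tok[i]).toList.take 1 = ['/'] := by simp [hl]
          simp only [mapBLoop, mapALoop2, dif_pos hi, if_pos hp, hget, hl,
            (startswith_slash tok[i]).mpr htake, if_true, List.drop_succ_cons,
            List.drop_zero]
        · by_cases he : '=' ∈ (tok[i]).toList
          · -- '=' token not starting with '/': A's loop2 passes it and stops; B stops
            have hp1 : mapALoop1 tok (fuel + 1) i = i + 1 := by
              simp only [mapALoop1]; rw [dif_pos hi, if_pos he]
            have hsw : PySem.Str.startswith tok[i] "/" = false := by
              rw [Bool.eq_false_iff, Ne, startswith_slash, hl]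
              simp [hc]
            have he' : '=' ∈ c :: rest := hl ▸ he
            simp only [mapBLoop, mapALoop2, dif_pos hi, hsw, Bool.false_eq_true,
              if_false, if_pos he', hp1, if_pos (by omega : i < i + 1), hget, hl,
              if_neg hc]
            exact mapALoop2_stop tok fuel (i + 1) (i + 1) (by omega)
          · -- plain token: both loops advance
            have hp1 : mapALoop1 tok (fuel + 1) i = mapALoop1 tok fuel (i + 1) := by
              simp only [mapALoop1]; rw [dif_pos hi, if_neg he]
            have hp : i < mapALoop1 tok (fuel + 1) i := by
              rw [hp1]
              have := mapALoop1_ge tok fuel (i + 1) (by omega)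
              omega
            have hsw : PySem.Str.startswith tok[i] "/" = false := by
              rw [Bool.eq_false_iff, Ne, startswith_slash, hl]
              simp [hc]
            have hstep : NoRaiseFrom tok (i + 1) :=
              noRaiseFrom_step tok i h ⟨by rw [hget, hl]; simp [hc], by rw [hget]; exact he⟩
            have hrec := ih (i + 1) (by omega) hstep
            have he' : '=' ∉ c :: rest := hl ▸ he
            simp only [mapBLoop, mapALoop2, dif_pos hi, hsw, Bool.false_eq_true,
              if_false, if_neg he', if_pos (hp1 ▸ hp), hget, hl, if_neg hc, hp1]
            exact hrec
    · -- i past the end: both return tok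
      have h1 : mapALoop1 tok (fuel + 1) i = tok.length := by
        simp only [mapALoop1]; rw [dif_neg hi]
      rw [h1, mapALoop2_stop tok (fuel + 1) tok.length i hi]
      simp only [mapBLoop, dif_neg hi]

-- ===== VERDICT (by name: the statement is the Claim_ definition above) =====
theorem mapSubcktDef_spec : Claim_equal_mapSubcktDef := by
  intro tok _ hpre
  unfold Spec_mapSubcktDef mapSubcktDef mapSubcktDef_alt
  exact main_loop tok tok.length 2 (by omega) hpre
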